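-- pv_equiv track=rewrite | github.com/miliar/Code_Jam_Webscraper | solutions_python/Problem_187/1189.py | solve
-- ===== SOURCE A (Python) =====
-- parties = "ABCDEFGHIJKLMNOPQRSTUVWXYZ"
--
-- def senate_major(p):
--     '''
--     -> (party_id, majority_count, total_count, party_id_2ndmajor)
--     '''
--     maxp = maxp_last = None
--     maxc = 0
--     tot = 0
--     for i in range(len(p)):
--         if p[i] >= maxc:
--             maxp_last = maxp
--             maxp = i
--             maxc = p[i]
--         tot += p[i]
--     return (maxp, maxc, tot, maxp_last)
--
-- def solve(arg):
--     n, p = arg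
--     # indoor = sum(p.values())
--     r = []
--
--     while 1:
--         pout = ""
--         pid, pn, indoor_, pidx = senate_major(p)
--         if pn == 0:
--             break
--         p[pid] -= 1
--         pout += parties[pid]
--         if indoor_ >= 2:
--             pid2, pn2, indoor_2, pidx2 = senate_major(p)
--             p_ = p[:]
--             p_[pid2] -= 1
--             pid3, pn3, indoor_3, pidx3 = senate_major(p_)
--             if not (pn3 > (indoor_3 - pn3)):
--                 pout += parties[pid2]
--                 p[pid2] -= 1
--         r.append(pout)
--
--     return " ".join(r)
-- ===== SOURCE B (Python) =====
-- # B: keeps the parties in a descending-ordered agenda (count, index) maintained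
-- # incrementally by ordered insertion, with a running total, instead of rescanning
-- # the whole count list three times per round as A does.
-- # Note: A mutates its list argument p in place; B does not (return values agree).
-- parties = "ABCDEFGHIJKLMNOPQRSTUVWXYZ"
--
-- def _insort(h, item):
--     # insert item into h, kept sorted in decreasing (count, index) order
--     k = 0
--     while k < len(h) and h[k] > item:
--         k += 1
--     h.insert(k, item)
--
-- def solve(arg):
--     n, p = arg
--     h = sorted(((p[i], i) for i in range(len(p))), reverse=True)
--     total = sum(p)
--     r = []
--     while h:
--         c1, i1 = h.pop(0)
--         if c1 <= 0:
--             break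
--         pout = parties[i1]
--         _insort(h, (c1 - 1, i1))
--         t = total - 1
--         if total >= 2:
--             c2, i2 = h.pop(0)
--             rest = h[0][0] if h else c2 - 1
--             m = rest if rest > c2 - 1 else c2 - 1
--             if not (m > (t - 1) - m):
--                 pout += parties[i2]
--                 _insort(h, (c2 - 1, i2))
--                 t -= 1
--             else:
--                 _insort(h, (c2, i2))
--         total = t
--         r.append(pout)
--     return " ".join(r)
-- ===== Notes on version B (the rewrite author's own statement) =====
-- stated objective: alternative
-- what changed: B replaces A's three full senate_major rescans per round with a descending (count, index) agenda maintained incrementally by ordered insertion plus a running total, so each round pops the leading party in O(1) and re-inserts decremented entries.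
import Mathlib
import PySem

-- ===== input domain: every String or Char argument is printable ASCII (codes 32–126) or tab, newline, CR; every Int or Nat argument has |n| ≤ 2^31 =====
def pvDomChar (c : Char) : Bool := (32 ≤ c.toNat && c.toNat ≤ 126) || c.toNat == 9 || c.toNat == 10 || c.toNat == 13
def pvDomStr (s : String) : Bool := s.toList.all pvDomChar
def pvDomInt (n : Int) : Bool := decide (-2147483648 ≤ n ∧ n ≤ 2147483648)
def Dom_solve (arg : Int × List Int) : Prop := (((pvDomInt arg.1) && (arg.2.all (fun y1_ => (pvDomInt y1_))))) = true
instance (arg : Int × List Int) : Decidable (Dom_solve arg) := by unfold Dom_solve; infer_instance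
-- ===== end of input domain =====

-- B keeps the parties in a descending-ordered (count, index) agenda maintained by
-- ordered insertion plus a running total, instead of A's three full rescans per round.
-- A mutates its list argument in place; B does not — the equivalence is about the return value.
-- Both loop ports use a fuel guard (totality only): pvFuel p bounds the iteration count,
-- since every iteration decrements a positive entry.

def partiesS : String := "ABCDEFGHIJKLMNOPQRSTUVWXYZ"

-- parties[i]; in range whenever 0 ≤ i < 26 (guaranteed under Pre_solve; Python raises outside)
def pchar (i : Int) : Char := (PySem.Str.pyGet? partiesS i).getD ' '

def pvFuel (p : List Int) : Nat := (p.map Int.natAbs).sum + 1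

-- ===== PORT A =====
-- state = (maxp, maxp_last, maxc, tot)
def smStep (st : Option Int × Option Int × Int × Int) (iv : Int × Int) :
    Option Int × Option Int × Int × Int :=
  if st.2.2.1 ≤ iv.2 then (some iv.1, st.1, iv.2, st.2.2.2 + iv.2)
  else (st.1, st.2.1, st.2.2.1, st.2.2.2 + iv.2)

def smFold (l : List (Int × Int)) : Option Int × Option Int × Int × Int :=
  l.foldl smStep (none, none, 0, 0)

-- senate_major: the 'for i in range(len(p))' with p[i] is folded over enumerate(p)
def senate_major (p : List Int) : Option Int × Int × Int × Option Int :=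
  let st := smFold (PySem.List.enumerate p 0)
  (st.1, st.2.2.1, st.2.2.2, st.2.1)

def solveLoopA : Nat → List Int → List String → List String
  | 0, _, r => r.reverse
  | fuel+1, p, r =>
    let s := senate_major p
    let pid := s.1.getD 0          -- s.1 = some _ whenever pn ≠ 0 (Python would crash on None)
    let pn := s.2.1
    let indoor_ := s.2.2.1
    if pn = 0 then r.reverse
    else
      let p1 := PySem.List.pySetD p pid (PySem.List.pyGetD p pid 0 - 1)
      let pout := "".push (pchar pid)
      if 2 ≤ indoor_ then
        let s2 := senate_major p1
        let pid2 := s2.1.getD 0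
        let p_ := PySem.List.pySetD p1 pid2 (PySem.List.pyGetD p1 pid2 0 - 1)
        let s3 := senate_major p_
        let pn3 := s3.2.1
        let indoor_3 := s3.2.2.1
        if ¬ (indoor_3 - pn3 < pn3) then
          solveLoopA fuel p_ ((pout.push (pchar pid2)) :: r)
        else solveLoopA fuel p1 (pout :: r)
      else solveLoopA fuel p1 (pout :: r)

def solve (arg : Int × List Int) : String :=
  PySem.Str.join " " (solveLoopA (pvFuel arg.2) arg.2 [])

-- ===== PORT B =====
-- h[k] > item on (count, index) tuples, Python lexicographic >
def pairGt (a b : Int × Int) : Bool := b.1 < a.1 || (a.1 == b.1 && b.2 < a.2)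

def insortB : List (Int × Int) → (Int × Int) → List (Int × Int)
  | [], x => [x]
  | y :: t, x => if pairGt y x then y :: insortB t x else x :: y :: t

-- port of sorted(((p[i], i) ...), reverse=True) as an ordered-insertion fold: exact here,
-- because the (count, index) keys are pairwise distinct, so the descending arrangement is unique
def buildB (p : List Int) : List (Int × Int) :=
  (PySem.List.enumerate p 0).foldl (fun h iv => insortB h (iv.2, iv.1)) []

def solveLoopB : Nat → List (Int × Int) → Int → List String → List String
  | 0, _, _, r => r.reverse
  | fuel+1, h, total, r =>
    match h with
    | [] => r.reverse
    | (c1, i1) :: h0 =>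
      if c1 ≤ 0 then r.reverse
      else
        let pout := String.singleton (pchar i1)
        let h1 := insortB h0 (c1 - 1, i1)
        let t := total - 1
        if 2 ≤ total then
          match h1 with
          | [] => r.reverse        -- unreachable: insortB never returns []
          | (c2, i2) :: h2 =>
            let rest := match h2 with | [] => c2 - 1 | (c3, _) :: _ => c3
            let m := if c2 - 1 < rest then rest else c2 - 1
            if ¬ ((t - 1) - m < m) then
              solveLoopB fuel (insortB h2 (c2 - 1, i2)) (t - 1) ((pout.push (pchar i2)) :: r)
            else
              solveLoopB fuel (insortB h2 (c2, i2)) t (pout :: r)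
        else solveLoopB fuel h1 t (pout :: r)

def solve_alt (arg : Int × List Int) : String :=
  PySem.Str.join " " (solveLoopB (pvFuel arg.2) (buildB arg.2) arg.2.sum [])

-- ===== PRECONDITION & SPEC =====
-- Pre_ excludes exactly the inputs on which the Python A raises IndexError ("parties"
-- has 26 letters): lists with a positive count at an index ≥ 26 (B raises there too).
def Pre_solve (arg : Int × List Int) : Prop := ∀ x ∈ arg.2.drop 26, x ≤ 0
instance (arg : Int × List Int) : Decidable (Pre_solve arg) := by unfold Pre_solve; infer_instance

def pvWitness_solve : (Int × List Int) := (3, [2, 3, 1])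

def Spec_solve (arg : Int × List Int) (out : String) : Prop := out = solve_alt arg
instance (arg : Int × List Int) (out : String) : Decidable (Spec_solve arg out) := by unfold Spec_solve; infer_instance

-- ===== CLAIM (what is proved, stated in full; the proofs are below) =====
def Claim_equal_solve : Prop := ∀ (arg : Int × List Int), Dom_solve arg → Pre_solve arg → Spec_solve arg (solve arg)

-- ===== LEMMAS AND PROOFS =====

-- keys of p: (value, index) pairs of enumerate(p)
def K (p : List Int) : List (Int × Int) := (PySem.List.enumerate p 0).map (fun iv => (iv.2, iv.1))

def SortedH (h : List (Int × Int)) : Prop := h.Pairwise (fun a b => pairGt b a = false)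

lemma pairGt_iff (a b : Int × Int) : pairGt a b = true ↔ (b.1 < a.1 ∨ (a.1 = b.1 ∧ b.2 < a.2)) := by
  simp [pairGt]

lemma pairGt_false_iff (a b : Int × Int) : pairGt a b = false ↔ (a.1 < b.1 ∨ (a.1 = b.1 ∧ a.2 ≤ b.2)) := by
  rw [← Bool.not_eq_true, pairGt_iff]
  constructor
  · intro h; omega
  · intro h; omega

lemma insort_perm (h : List (Int × Int)) (x : Int × Int) : (insortB h x).Perm (x :: h) := by
  induction h with
  | nil => simp [insortB]
  | cons y t ih =>
    simp only [insortB]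
    split
    · exact ((ih.cons y).trans (List.Perm.swap x y t))
    · rfl

lemma insort_sorted (h : List (Int × Int)) (x : Int × Int) (hs : SortedH h) :
    SortedH (insortB h x) := by
  induction h with
  | nil => simp [insortB, SortedH]
  | cons y t ih =>
    rw [SortedH, List.pairwise_cons] at hs
    simp only [insortB]
    split
    · rename_i hyx
      rw [SortedH, List.pairwise_cons]
      refine ⟨?_, ih hs.2⟩
      intro z hz
      rcases List.mem_cons.mp ((insort_perm t x).mem_iff.mp hz) with hz | hz
      · subst hz
        rw [pairGt_false_iff]; rw [pairGt_iff] at hyx; omega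
      · exact hs.1 z hz
    · rename_i hyx
      rw [Bool.not_eq_true] at hyx
      rw [SortedH, List.pairwise_cons]
      refine ⟨?_, List.pairwise_cons.mpr hs⟩
      intro z hz
      rcases List.mem_cons.mp hz with hz | hz
      · subst hz; exact hyx
      · have := hs.1 z hz
        rw [pairGt_false_iff] at *; omega

lemma insort_of_top (h : List (Int × Int)) (x : Int × Int)
    (hx : ∀ y ∈ h, pairGt y x = false) : insortB h x = x :: h := by
  cases h with
  | nil => rfl
  | cons y t => simp [insortB, hx y (by simp)]

lemma insort_ne_nil (h : List (Int × Int)) (x : Int × Int) : insortB h x ≠ [] := by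
  cases h with
  | nil => simp [insortB]
  | cons y t => simp only [insortB]; split <;> simp

lemma sorted_head_ge (a : Int × Int) (t : List (Int × Int)) (hs : SortedH (a :: t)) :
    ∀ y ∈ a :: t, pairGt y a = false := by
  rw [SortedH, List.pairwise_cons] at hs
  intro y hy
  rcases List.mem_cons.mp hy with hy | hy
  · subst hy; rw [pairGt_false_iff]; omega
  · exact hs.1 y hy

-- the specification of senate_major's (maxp, maxc) on a list of (index, value) pairs
def SMspec (l : List (Int × Int)) (mp : Option Int) (mc : Int) : Prop :=
  0 ≤ mc ∧ (∀ iv ∈ l, iv.2 ≤ mc) ∧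
  (match mp with
   | none => mc = 0 ∧ ∀ iv ∈ l, iv.2 < 0
   | some j => (j, mc) ∈ l ∧ ∀ iv ∈ l, iv.2 < mc ∨ (iv.2 = mc ∧ iv.1 ≤ j))

lemma smFold_tot (l : List (Int × Int)) :
    ∀ init : Option Int × Option Int × Int × Int,
      (l.foldl smStep init).2.2.2 = init.2.2.2 + (l.map (·.2)).sum := by
  induction l with
  | nil => intro init; simp
  | cons x t ih =>
    intro init
    simp only [List.foldl_cons, List.map_cons, List.sum_cons]
    rw [ih]
    simp only [smStep]
    split <;> simp <;> ring

lemma smFold_spec (l : List (Int × Int)) (hl : l.Pairwise (fun a b => a.1 < b.1)) :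
    SMspec l (smFold l).1 (smFold l).2.2.1 := by
  induction l using List.reverseRecOn with
  | nil => simp [smFold, SMspec]
  | append_singleton t x ih =>
    have ht : t.Pairwise (fun a b => a.1 < b.1) := hl.sublist (by simp)
    have hxl : ∀ iv ∈ t, iv.1 < x.1 := by
      intro iv hiv
      have := List.pairwise_append.mp hl
      exact this.2.2 iv hiv x (by simp)
    have ihs := ih ht
    rw [smFold, List.foldl_append] at *
    simp only [List.foldl_cons, List.foldl_nil]
    set st := t.foldl smStep (none, none, 0, 0) with hst
    obtain ⟨h0, hub, hcase⟩ := ihs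
    simp only [smStep]
    split
    · rename_i hge
      dsimp only
      refine ⟨by omega, ?_, ?_⟩
      · intro iv hiv
        rcases List.mem_append.mp hiv with h | h
        · have := hub iv h; omega
        · simp at h; subst h; omega
      · simp only
        refine ⟨by simp, ?_⟩
        intro iv hiv
        rcases List.mem_append.mp hiv with h | h
        · have h1 := hub iv h
          by_cases hv : iv.2 = x.2
          · right; exact ⟨hv, le_of_lt (hxl iv h)⟩
          · left; omega
        · simp at h; subst h; right; exact ⟨rfl, le_refl _⟩
    · rename_i hge
      dsimp only
      push_neg at hge
      refine ⟨h0, ?_, ?_⟩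
      · intro iv hiv
        rcases List.mem_append.mp hiv with h | h
        · exact hub iv h
        · simp at h; subst h; omega
      · cases hmp : st.1 with
        | none =>
          rw [hmp] at hcase
          simp only
          refine ⟨hcase.1, ?_⟩
          intro iv hiv
          rcases List.mem_append.mp hiv with h | h
          · exact hcase.2 iv h
          · simp at h; subst h; omega
        | some j =>
          rw [hmp] at hcase
          simp only
          refine ⟨List.mem_append_left _ hcase.1, ?_⟩
          intro iv hiv
          rcases List.mem_append.mp hiv with h | h
          · exact hcase.2 iv h
          · simp at h; subst h; left; omega

lemma sm_spec (p : List Int) :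
    SMspec (PySem.List.enumerate p 0) (senate_major p).1 (senate_major p).2.1 := by
  have := smFold_spec (PySem.List.enumerate p 0) (PySem.List.pairwise_lt_enumerate p 0)
  simpa [senate_major] using this

lemma sm_tot (p : List Int) : (senate_major p).2.2.1 = p.sum := by
  have := smFold_tot (PySem.List.enumerate p 0) (none, none, 0, 0)
  simp only [senate_major, smFold]
  rw [this]
  simp [PySem.List.map_snd_enumerate]

lemma mem_K_iff (p : List Int) (c i : Int) :
    (c, i) ∈ K p ↔ ∃ (k : Nat) (h : k < p.length), i = (k : Int) ∧ c = p[k] := by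
  simp only [K, List.mem_map, PySem.List.mem_enumerate_iff]
  constructor
  · rintro ⟨iv, ⟨k, hk, hiv⟩, he⟩
    subst hiv
    simp only [Prod.mk.injEq] at he
    exact ⟨k, hk, by omega, he.1.symm⟩
  · rintro ⟨k, hk, hi, hc⟩
    exact ⟨((k : Int), p[k]), ⟨k, hk, by simp⟩, by simp [hi, hc]⟩

lemma K_snd_nodup (p : List Int) : ((K p).map (·.2)).Nodup := by
  have h := PySem.List.pairwise_lt_enumerate p 0
  have : ((K p).map (·.2)).Pairwise (· < ·) := by
    simp only [K, List.map_map]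
    exact (List.pairwise_map).mpr (h.imp (fun hab => hab))
  exact this.nodup

lemma sum_nonpos_of_le_zero (l : List Int) (h : ∀ x ∈ l, x ≤ 0) : l.sum ≤ 0 := by
  induction l with
  | nil => simp
  | cons a t ih =>
    simp only [List.sum_cons]
    have := h a (by simp)
    have := ih (fun x hx => h x (by simp [hx]))
    omega

-- the bridge: a sorted permutation of K p determines senate_major's (maxp, maxc)
lemma head_char (p : List Int) (c1 i1 : Int) (h0 : List (Int × Int))
    (hperm : ((c1, i1) :: h0).Perm (K p)) (hs : SortedH ((c1, i1) :: h0)) :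
    ((0 < c1 → (senate_major p).1 = some i1 ∧ (senate_major p).2.1 = c1) ∧
     (c1 ≤ 0 → (senate_major p).2.1 = 0)) := by
  have hge : ∀ y ∈ K p, pairGt y (c1, i1) = false := by
    intro y hy
    exact sorted_head_ge _ _ hs y (hperm.mem_iff.mpr hy)
  have hmem : (c1, i1) ∈ K p := hperm.mem_iff.mp (by simp)
  have hub : ∀ y ∈ K p, y.1 < c1 ∨ (y.1 = c1 ∧ y.2 ≤ i1) := by
    intro y hy
    have := hge y hy
    rw [pairGt_false_iff] at this
    simpa using this
  obtain ⟨hmc0, hubE, hcase⟩ := sm_spec p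
  have memE : ∀ c i : Int, (c, i) ∈ K p ↔ (i, c) ∈ PySem.List.enumerate p 0 := by
    intro c i
    simp only [K, List.mem_map]
    constructor
    · rintro ⟨iv, hiv, he⟩
      simp only [Prod.mk.injEq] at he
      obtain ⟨h1, h2⟩ := he
      have : iv = (i, c) := by cases iv; simp_all
      rwa [this] at hiv
    · intro hiv; exact ⟨(i, c), hiv, rfl⟩
  constructor
  · intro hc1
    cases hmp : (senate_major p).1 with
    | none =>
      rw [hmp] at hcase
      exfalso
      have := hcase.2 (i1, c1) ((memE c1 i1).mp hmem)
      simp at this; omega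
    | some j =>
      rw [hmp] at hcase
      obtain ⟨hjm, hall⟩ := hcase
      have h1 := hall (i1, c1) ((memE c1 i1).mp hmem)
      have h2 := hub ((senate_major p).2.1, j) ((memE _ j).mpr hjm)
      simp only at h1 h2
      have hceq : (senate_major p).2.1 = c1 := by omega
      have hjeq : j = i1 := by omega
      exact ⟨by rw [hjeq], hceq⟩
  · intro hc1
    cases hmp : (senate_major p).1 with
    | none => rw [hmp] at hcase; exact hcase.1
    | some j =>
      rw [hmp] at hcase
      have := hub ((senate_major p).2.1, j) ((memE _ j).mpr hcase.1)
      simp only at this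
      omega

-- updating p at the head index: K of the updated list
lemma enumerate_set (v : Int) : ∀ (q : List Int) (s : Int) (k : Nat), k < q.length →
    PySem.List.enumerate (q.set k v) s
      = (PySem.List.enumerate q s).map (fun iv => if iv.1 = s + (k : Int) then (iv.1, v) else iv) := by
  intro q
  induction q with
  | nil => intro s k hk; simp at hk
  | cons a t ih =>
    intro s k hk
    cases k with
    | zero =>
      simp only [List.set_cons_zero, PySem.List.enumerate_cons, List.map_cons,
        Int.natCast_zero, add_zero]
      simp only [if_true]
      congr 1
      have hne : ∀ iv ∈ PySem.List.enumerate t (s + 1),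
          (if iv.1 = s then ((iv.1 : Int), v) else iv) = iv := by
        intro iv hiv
        obtain ⟨m, hm, he⟩ := (PySem.List.mem_enumerate_iff _ _ _).mp hiv
        subst he
        rw [if_neg (by simp; omega)]
      refine Eq.symm ?_
      calc List.map (fun iv => if iv.1 = s then (iv.1, v) else iv) (PySem.List.enumerate t (s + 1))
          = List.map id (PySem.List.enumerate t (s + 1)) :=
            List.map_congr_left (fun iv hiv => by rw [hne iv hiv]; rfl)
        _ = _ := List.map_id _
    | succ m =>
      simp only [List.set_cons_succ, PySem.List.enumerate_cons, List.map_cons]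
      rw [if_neg (show ¬((s : Int) = s + ((m : Nat) + 1 : Nat)) by push_cast; omega)]
      congr 1
      rw [ih (s + 1) m (by simpa using hk)]
      apply List.map_congr_left
      intro iv hiv
      have harith : s + 1 + (m : Int) = s + ((m : Nat) + 1 : Nat) := by push_cast; ring
      show (if iv.1 = s + 1 + (m : Int) then (iv.1, v) else iv)
          = (if iv.1 = s + ((m : Nat) + 1 : Nat) then (iv.1, v) else iv)
      rw [harith]

lemma K_set (p : List Int) (k : Nat) (hk : k < p.length) (v : Int) :
    K (p.set k v) = (K p).map (fun y => if y.2 = (k : Int) then (v, y.2) else y) := by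
  simp only [K]
  rw [enumerate_set v p 0 k hk]
  rw [List.map_map, List.map_map]
  apply List.map_congr_left
  intro iv hiv
  simp only [Function.comp_apply, zero_add]
  by_cases h : iv.1 = (k : Int) <;> simp [h]

-- K sums: total bookkeeping
lemma K_sum (p : List Int) : ((K p).map (·.1)).sum = p.sum := by
  simp only [K, List.map_map]
  have : ((PySem.List.enumerate p 0).map ((·.1) ∘ fun iv => (iv.2, iv.1))) =
      (PySem.List.enumerate p 0).map (·.2) := rfl
  rw [this, PySem.List.map_snd_enumerate]

-- replacement step: from h = (c,i)::h0 ~ K p, the decremented key list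
lemma K_step (p : List Int) (c i : Int) (h0 : List (Int × Int))
    (hperm : ((c, i) :: h0).Perm (K p)) (v : Int) :
    ∃ (k : Nat) (hk : k < p.length), i = (k : Int) ∧ c = p[k] ∧
      ((v, i) :: h0).Perm (K (p.set k v)) := by
  have hmem : (c, i) ∈ K p := hperm.mem_iff.mp (by simp)
  obtain ⟨k, hk, hi, hc⟩ := (mem_K_iff p c i).mp hmem
  refine ⟨k, hk, hi, hc, ?_⟩
  have hnodup : (((c, i) :: h0).map (·.2)).Nodup := by
    have := K_snd_nodup p
    exact ((hperm.map (·.2)).nodup_iff).mpr this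
  have hni : ∀ y ∈ h0, ¬ (y.2 = i) := by
    simp only [List.map_cons, List.nodup_cons] at hnodup
    intro y hy he
    exact hnodup.1 (he ▸ List.mem_map_of_mem hy)
  have hmap : ((c, i) :: h0).map (fun y => if y.2 = (k : Int) then (v, y.2) else y)
      = (v, i) :: h0 := by
    rw [List.map_cons]
    congr 1
    · show (if i = (k : Int) then ((v : Int), i) else (c, i)) = (v, i)
      rw [if_pos hi]
    · calc h0.map (fun y => if y.2 = (k : Int) then (v, y.2) else y)
          = h0.map id := List.map_congr_left (fun y hy => by
              show (if y.2 = (k : Int) then ((v : Int), y.2) else y) = id y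
              rw [if_neg (by rw [← hi]; exact hni y hy)]; rfl)
        _ = h0 := List.map_id _
  have hp := hperm.map (fun y : Int × Int => if y.2 = (k : Int) then (v, y.2) else y)
  rw [hmap] at hp
  rw [← K_set p k hk v] at hp
  exact hp

lemma singleton_eq_push (c : Char) : String.singleton c = "".push c := rfl

lemma mem_K_enum (p : List Int) (y : Int × Int) :
    y ∈ K p ↔ (y.2, y.1) ∈ PySem.List.enumerate p 0 := by
  simp only [K, List.mem_map]
  constructor
  · rintro ⟨iv, hiv, he⟩
    have : iv = (y.2, y.1) := by cases iv; cases y; simp_all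
    rwa [this] at hiv
  · intro hiv; exact ⟨(y.2, y.1), hiv, rfl⟩

lemma sum_eq_of_perm (p : List Int) (h : List (Int × Int)) (hperm : h.Perm (K p)) :
    (h.map (·.1)).sum = p.sum := by
  rw [← K_sum p]
  exact (hperm.map (·.1)).sum_eq

lemma head_ub (c i : Int) (h0 : List (Int × Int)) (hs : SortedH ((c, i) :: h0)) :
    ∀ y ∈ (c, i) :: h0, y.1 ≤ c := by
  intro y hy
  have := sorted_head_ge _ _ hs y hy
  rw [pairGt_false_iff] at this
  rcases this with h | h
  · simpa using le_of_lt h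
  · simp only at h; omega

lemma head_pos (p : List Int) (c i : Int) (h0 : List (Int × Int))
    (hperm : ((c, i) :: h0).Perm (K p)) (hs : SortedH ((c, i) :: h0))
    (hsum : 0 < p.sum) : 0 < c := by
  by_contra hc
  push_neg at hc
  have hsum' : (((c, i) :: h0).map (·.1)).sum = p.sum := sum_eq_of_perm p _ hperm
  have hle : ∀ x ∈ ((c, i) :: h0).map (·.1), x ≤ 0 := by
    intro x hx
    obtain ⟨y, hy, he⟩ := List.mem_map.mp hx
    have := head_ub c i h0 hs y hy
    omega
  have := sum_nonpos_of_le_zero _ hle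
  omega

-- the second-removal peek: the head value of the reordered agenda is senate_major's maxc
lemma sm_pn_eq (p_ : List Int) (c i m : Int) (h2 : List (Int × Int))
    (hperm : ((c, i) :: h2).Perm (K p_)) (hub2 : ∀ y ∈ h2, y.1 ≤ m) (hcm : c ≤ m)
    (hatt : m = c ∨ ∃ y ∈ h2, y.1 = m) (hsum : 0 ≤ p_.sum) :
    (senate_major p_).2.1 = m := by
  have hubK : ∀ y ∈ K p_, y.1 ≤ m := by
    intro y hy
    rcases List.mem_cons.mp (hperm.mem_iff.mpr hy) with h | h
    · subst h; exact hcm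
    · exact hub2 y h
  have hm0 : 0 ≤ m := by
    by_contra hneg
    push_neg at hneg
    have hsum' : (((c, i) :: h2).map (·.1)).sum = p_.sum := sum_eq_of_perm p_ _ hperm
    have htail : (h2.map (·.1)).sum ≤ 0 := by
      apply sum_nonpos_of_le_zero
      intro x hx
      obtain ⟨y, hy, he⟩ := List.mem_map.mp hx
      have := hub2 y hy
      omega
    simp only [List.map_cons, List.sum_cons] at hsum'
    omega
  obtain ⟨hmc0, hubE, hcase⟩ := sm_spec p_
  have hmle : m ≤ (senate_major p_).2.1 := by
    rcases hatt with h | ⟨y, hy, he⟩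
    · have hmem : (c, i) ∈ K p_ := hperm.mem_iff.mp (by simp)
      have := hubE (i, c) ((mem_K_enum p_ (c, i)).mp hmem)
      simp only at this
      omega
    · have hmem : y ∈ K p_ := hperm.mem_iff.mp (by simp [hy])
      have := hubE (y.2, y.1) ((mem_K_enum p_ y).mp hmem)
      simp only at this
      omega
  have hmge : (senate_major p_).2.1 ≤ m := by
    cases hmp : (senate_major p_).1 with
    | none => rw [hmp] at hcase; omega
    | some j =>
      rw [hmp] at hcase
      have hmem : ((senate_major p_).2.1, j) ∈ K p_ :=
        (mem_K_enum p_ ((senate_major p_).2.1, j)).mpr hcase.1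
      have := hubK ((senate_major p_).2.1, j) hmem
      simpa using this
  omega

-- pySetD/pyGetD at an in-range natural index
lemma pySet_step (p : List Int) (k : Nat) (hk : k < p.length) (c : Int) (hc : c = p[k]) :
    PySem.List.pySetD p ((k : Nat) : Int) (PySem.List.pyGetD p ((k : Nat) : Int) 0 - 1)
      = p.set k (c - 1) := by
  rw [PySem.List.pySetD_natCast, PySem.List.pyGetD_natCast]
  congr 1
  rw [List.getD_eq_getElem p 0 hk]
  omega

lemma build_aux : ∀ (l : List (Int × Int)) (h : List (Int × Int)), SortedH h →
    SortedH (l.foldl (fun h iv => insortB h (iv.2, iv.1)) h) ∧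
    (l.foldl (fun h iv => insortB h (iv.2, iv.1)) h).Perm (h ++ l.map (fun iv => (iv.2, iv.1))) := by
  intro l
  induction l with
  | nil => intro h hs; exact ⟨hs, by simp⟩
  | cons iv t ih =>
    intro h hs
    simp only [List.foldl_cons, List.map_cons]
    obtain ⟨hs', hp'⟩ := ih (insortB h (iv.2, iv.1)) (insort_sorted h _ hs)
    refine ⟨hs', ?_⟩
    refine hp'.trans ?_
    have h1 : (insortB h (iv.2, iv.1)).Perm ((iv.2, iv.1) :: h) := insort_perm h _
    exact (h1.append_right _).trans List.perm_middle.symm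

lemma buildB_perm (p : List Int) : (buildB p).Perm (K p) ∧ SortedH (buildB p) := by
  obtain ⟨hs, hp⟩ := build_aux (PySem.List.enumerate p 0) [] (by simp [SortedH])
  exact ⟨by simpa [K] using hp, hs⟩

-- ===== the lockstep lemma =====
lemma loop_eq : ∀ (fuel : Nat) (p : List Int) (h : List (Int × Int)) (total : Int) (r : List String),
    h.Perm (K p) → SortedH h → total = p.sum →
    solveLoopA fuel p r = solveLoopB fuel h total r := by
  intro fuel
  induction fuel with
  | zero => intro p h total r _ _ _; rfl
  | succ n ih =>
    intro p h total r hperm hs htot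
    cases h with
    | nil =>
      have hK : K p = [] := by
        have := hperm.length_eq
        simp only [List.length_nil] at this
        exact List.eq_nil_of_length_eq_zero this.symm
      have hp : p = [] := by
        have : (K p).length = p.length := by
          simp [K, PySem.List.length_enumerate]
        rw [hK] at this
        exact List.eq_nil_of_length_eq_zero this.symm
      subst hp
      simp [solveLoopA, solveLoopB, senate_major, smFold, PySem.List.enumerate_nil]
    | cons x h0 =>
      obtain ⟨c1, i1⟩ := x
      obtain ⟨hcpos, hczero⟩ := head_char p c1 i1 h0 hperm hs
      by_cases hc1 : c1 ≤ 0
      · have hpn : (senate_major p).2.1 = 0 := hczero hc1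
        simp only [solveLoopA, solveLoopB]
        rw [if_pos hpn, if_pos hc1]
      · push_neg at hc1
        obtain ⟨hs1, hpn1⟩ := hcpos hc1
        obtain ⟨k, hk, hik, hck, hperm1⟩ := K_step p c1 i1 h0 hperm (c1 - 1)
        subst hik
        have hsumP : (((c1, ↑k) :: h0).map (·.1)).sum = p.sum := sum_eq_of_perm p _ hperm
        have hsum1 : (p.set k (c1 - 1)).sum = total - 1 := by
          have := sum_eq_of_perm (p.set k (c1 - 1)) _ hperm1
          simp only [List.map_cons, List.sum_cons] at this hsumP
          omega
        have hs0 : SortedH h0 := (List.pairwise_cons.mp hs).2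
        have hh1perm : (insortB h0 (c1 - 1, ↑k)).Perm (K (p.set k (c1 - 1))) :=
          (insort_perm h0 _).trans hperm1
        have hh1s : SortedH (insortB h0 (c1 - 1, ↑k)) := insort_sorted h0 _ hs0
        simp only [solveLoopA, solveLoopB]
        have hApn : ¬ ((senate_major p).2.1 = 0) := by rw [hpn1]; omega
        have hBc : ¬ (c1 ≤ 0) := by omega
        rw [if_neg hApn, if_neg hBc]
        rw [hs1]
        simp only [Option.getD_some]
        rw [pySet_step p k hk c1 hck]
        rw [sm_tot p, ← htot]
        rw [← singleton_eq_push]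
        by_cases h2tot : 2 ≤ total
        · rw [if_pos h2tot, if_pos h2tot]
          rcases hh1 : insortB h0 (c1 - 1, ↑k) with _ | ⟨⟨c2, i2⟩, h2⟩
          · exact absurd hh1 (insort_ne_nil h0 _)
          · rw [hh1] at hh1perm hh1s
            dsimp only
            obtain ⟨hcpos2, _⟩ := head_char (p.set k (c1 - 1)) c2 i2 h2 hh1perm hh1s
            have hc2 : 0 < c2 :=
              head_pos (p.set k (c1 - 1)) c2 i2 h2 hh1perm hh1s (by omega)
            obtain ⟨hs2some, hpn2⟩ := hcpos2 hc2
            obtain ⟨k2, hk2, hik2, hck2, hperm2⟩ := K_step (p.set k (c1 - 1)) c2 i2 h2 hh1perm (c2 - 1)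
            subst hik2
            have hsum2 : ((p.set k (c1 - 1)).set k2 (c2 - 1)).sum = total - 2 := by
              have ha := sum_eq_of_perm ((p.set k (c1 - 1)).set k2 (c2 - 1)) _ hperm2
              have hb := sum_eq_of_perm (p.set k (c1 - 1)) _ hh1perm
              simp only [List.map_cons, List.sum_cons] at ha hb
              omega
            have hs2tail : SortedH h2 := (List.pairwise_cons.mp hh1s).2
            rw [hs2some]
            simp only [Option.getD_some]
            rw [pySet_step (p.set k (c1 - 1)) k2 hk2 c2 hck2]
            -- identify pn3 with B's m, and indoor_3 with total - 2
            rcases h2 with _ | ⟨⟨c3, i3⟩, h3⟩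
            · -- h2 = []: rest = c2 - 1, m = c2 - 1
              have hpn3 : (senate_major ((p.set k (c1 - 1)).set k2 (c2 - 1))).2.1 = c2 - 1 := by
                apply sm_pn_eq _ (c2 - 1) ↑k2 (c2 - 1) [] hperm2 (by simp) le_rfl (Or.inl rfl)
                omega
              rw [hpn3, sm_tot, hsum2]
              rw [if_neg (by omega : ¬ (c2 - 1 < c2 - 1))]
              have harith : total - 2 = total - 1 - 1 := by ring
              rw [harith]
              by_cases hcond : ¬ (total - 1 - 1 - (c2 - 1) < c2 - 1)
              · rw [if_pos hcond, if_pos hcond]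
                exact ih _ _ _ _ ((insort_perm _ _).trans hperm2)
                  (insort_sorted _ _ hs2tail) (by omega)
              · rw [if_neg hcond, if_neg hcond]
                rw [insort_of_top [] (c2, ↑k2) (by simp)]
                exact ih _ _ _ _ hh1perm hh1s (by omega)
            · have hub3 : ∀ y ∈ (c3, i3) :: h3, y.1 ≤ c3 := head_ub c3 i3 h3 hs2tail
              have hmfacts : c2 - 1 ≤ (if c2 - 1 < c3 then c3 else c2 - 1) ∧
                  c3 ≤ (if c2 - 1 < c3 then c3 else c2 - 1) ∧
                  ((if c2 - 1 < c3 then c3 else c2 - 1) = c2 - 1 ∨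
                   (if c2 - 1 < c3 then c3 else c2 - 1) = c3) := by
                split <;> omega
              have hpn3 : (senate_major ((p.set k (c1 - 1)).set k2 (c2 - 1))).2.1
                  = (if c2 - 1 < c3 then c3 else c2 - 1) := by
                apply sm_pn_eq _ (c2 - 1) ↑k2 _ ((c3, i3) :: h3) hperm2
                · intro y hy
                  have := hub3 y hy
                  omega
                · exact hmfacts.1
                · rcases hmfacts.2.2 with h | h
                  · exact Or.inl h
                  · exact Or.inr ⟨(c3, i3), by simp, h.symm⟩
                · omega
              rw [hpn3, sm_tot, hsum2]
              have harith : total - 2 = total - 1 - 1 := by ring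
              rw [harith]
              by_cases hcond : ¬ (total - 1 - 1 - (if c2 - 1 < c3 then c3 else c2 - 1)
                  < (if c2 - 1 < c3 then c3 else c2 - 1))
              · rw [if_pos hcond, if_pos hcond]
                exact ih _ _ _ _ ((insort_perm _ _).trans hperm2)
                  (insort_sorted _ _ hs2tail) (by omega)
              · rw [if_neg hcond, if_neg hcond]
                rw [insort_of_top ((c3, i3) :: h3) (c2, ↑k2)
                  (fun y hy => sorted_head_ge (c2, ↑k2) ((c3, i3) :: h3) hh1s y
                    (List.mem_cons_of_mem _ hy))]
                exact ih _ _ _ _ hh1perm hh1s (by omega)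
        · rw [if_neg h2tot, if_neg h2tot]
          exact ih _ _ _ _ hh1perm hh1s (by omega)

-- ===== VERDICT (by name: the statement is the Claim_ definition above) =====
theorem solve_spec : Claim_equal_solve := by
  intro arg _hd _hp
  unfold Spec_solve solve solve_alt
  obtain ⟨hbp, hbs⟩ := buildB_perm arg.2
  rw [loop_eq (pvFuel arg.2) arg.2 (buildB arg.2) arg.2.sum [] hbp hbs rfl]
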